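-- pv_equiv track=rewrite | github.com/simple0710/BOJ | gold/[1863] 스카이라인 쉬운거.py | solution
-- ===== SOURCE A (Python) =====
-- def solution(apart_height):
--   stack = []
--   res = 0
--   for y in apart_height:
--     # 마지막으로 확인한 값이 현재 높이보다 큰 경우 건물 수 증가
--     # ex) 1 3, 2 2
--     while stack and stack[-1] > y:
--       res += 1
--       stack.pop()
--     if stack and stack[-1] == y: # 같은 값은 넘긴다.
--       continue
--     stack.append(y) # 현재 높이 추가
--   while stack: # 남은 층수가 있는 경우
--     # 마지막 높이가 0보다 크다면 건물 수 증가
--     if stack[-1] > 0: res += 1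
--     stack.pop()
--   # 최소 건물 개수 출력
--   return res
-- ===== SOURCE B (Python) =====
-- def solution(apart_height):
--     # Count each maximal visible run of equal height once, at its last column:
--     # a run ends when a strictly lower column appears (one building popped), is
--     # deferred when an equal column reappears first, and otherwise survives to
--     # the right edge, where it counts only if it is above ground level 0.
--     def contrib(y, rest):
--         for x in rest:
--             if x < y:
--                 return 1
--             if x == y:
--                 return 0
--         return 1 if y > 0 else 0
--
--     res = 0
--     rest = apart_height
--     while rest:
--         y, rest = rest[0], rest[1:]
--         res += contrib(y, rest)
--     return res
-- ===== Notes on version B (the rewrite author's own statement) =====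
-- stated objective: simpler
-- what changed: Replaces the monotonic-stack sweep with a stateless per-column scan to the right: each column adds 1 if the first later column of height <= it is strictly lower (its run of equal heights ends there), 0 if it is equal, and (height > 0) if no such column exists.
import Mathlib
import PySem

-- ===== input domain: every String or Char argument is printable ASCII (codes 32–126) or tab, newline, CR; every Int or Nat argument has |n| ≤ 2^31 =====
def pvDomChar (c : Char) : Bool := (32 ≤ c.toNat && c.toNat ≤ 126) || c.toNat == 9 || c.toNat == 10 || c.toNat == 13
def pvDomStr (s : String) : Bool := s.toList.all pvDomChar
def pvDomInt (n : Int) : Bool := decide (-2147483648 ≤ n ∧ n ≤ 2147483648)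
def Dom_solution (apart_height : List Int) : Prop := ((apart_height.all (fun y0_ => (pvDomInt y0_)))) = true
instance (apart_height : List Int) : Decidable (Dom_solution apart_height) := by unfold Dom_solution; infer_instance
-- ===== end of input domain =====

-- B replaces A's monotonic-stack sweep by an independent right-scan per column
-- (count each maximal visible run of equal height once, at its last column):
-- a simpler stateless decomposition, O(n^2) instead of A's O(n), exact on all inputs.


-- ===== PORT A =====
-- the 'while stack and stack[-1] > y' loop: returns (number of pops, remaining stack)
def popAll (y : Int) : List Int → Int × List Int
  | [] => (0, [])
  | a :: s => if a > y then let p := popAll y s; (p.1 + 1, p.2) else (0, a :: s)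

-- one iteration of 'for y in apart_height'
def stepA (st : List Int × Int) (y : Int) : List Int × Int :=
  let p := popAll y st.1
  let s := p.2
  let res := st.2 + p.1
  if s.head? = some y then (s, res) else (y :: s, res)

-- the final 'while stack' loop
def cleanupA : List Int → Int → Int
  | [], res => res
  | a :: s, res => cleanupA s (if a > 0 then res + 1 else res)

def solution (apart_height : List Int) : Int :=
  let st := apart_height.foldl stepA ([], 0)
  cleanupA st.1 st.2

-- ===== PORT B =====
-- contrib y rest: the inner 'for x in rest' scan of Source B
def contribB (y : Int) : List Int → Int
  | [] => if y > 0 then 1 else 0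
  | x :: rest => if x < y then 1 else if x = y then 0 else contribB y rest

-- the 'while rest' loop of Source B
def goB : List Int → Int → Int
  | [], res => res
  | y :: rest, res => goB rest (res + contribB y rest)

def solution_alt (apart_height : List Int) : Int := goB apart_height 0

-- ===== PRECONDITION & SPEC =====
def Spec_solution (apart_height : List Int) (out : Int) : Prop := out = solution_alt apart_height
instance (apart_height : List Int) (out : Int) : Decidable (Spec_solution apart_height out) := by unfold Spec_solution; infer_instance

-- ===== CLAIM (what is proved, stated in full; the proofs are below) =====
def Claim_equal_solution : Prop := ∀ (apart_height : List Int), Dom_solution apart_height → Spec_solution apart_height (solution apart_height)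

-- ===== LEMMAS AND PROOFS =====

theorem goB_acc (rest : List Int) (r : Int) : goB rest r = r + goB rest 0 := by
  induction rest generalizing r with
  | nil => simp [goB]
  | cons y t ih => simp only [goB]; rw [ih, ih (0 + contribB y t)]; ring

theorem cleanupA_eq (s : List Int) (r : Int) :
    cleanupA s r = r + (s.map (fun x => if x > 0 then (1 : Int) else 0)).sum := by
  induction s generalizing r with
  | nil => simp [cleanupA]
  | cons a t ih => simp only [cleanupA, List.map, List.sum_cons]; rw [ih]; split_ifs <;> ring

theorem popAll_eq (y : Int) (s : List Int) :
    popAll y s = (((s.takeWhile (fun a => a > y)).length : Int), s.dropWhile (fun a => a > y)) := by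
  induction s with
  | nil => simp [popAll]
  | cons a t ih =>
    by_cases h : a > y
    · simp [popAll, h, List.takeWhile, List.dropWhile, ih]
    · simp [popAll, h, List.takeWhile, List.dropWhile]

theorem contrib_cons_of_lt (y x : Int) (rest : List Int) (h : x < y) :
    contribB x (y :: rest) = contribB x rest := by
  simp [contribB, not_lt.mpr (le_of_lt h), (ne_of_lt h).symm]

theorem contrib_cons_of_gt (y x : Int) (rest : List Int) (h : y < x) :
    contribB x (y :: rest) = 1 := by
  simp [contribB, h]

theorem sum_contrib_gt (y : Int) (rest : List Int) :
    ∀ l : List Int, (∀ x ∈ l, y < x) →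
      (l.map (fun x => contribB x (y :: rest))).sum = (l.length : Int) := by
  intro l
  induction l with
  | nil => intro _; simp
  | cons a t ih =>
    intro hl
    simp only [List.map, List.sum_cons, List.length_cons]
    rw [contrib_cons_of_gt y a rest (hl a List.mem_cons_self),
        ih (fun x hx => hl x (List.mem_cons_of_mem _ hx))]
    push_cast; ring

-- main invariant: for a strictly decreasing stack, A's remaining sweep plus cleanup
-- equals the accumulator + B's count of rest + the future fate of each stack entry
theorem main_inv (rest : List Int) : ∀ (stack : List Int) (res : Int),
    stack.Pairwise (fun a b => b < a) →
    cleanupA (rest.foldl stepA (stack, res)).1 (rest.foldl stepA (stack, res)).2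
      = res + goB rest 0 + (stack.map (fun x => contribB x rest)).sum := by
  induction rest with
  | nil =>
    intro stack res _
    simp only [List.foldl_nil]
    rw [cleanupA_eq]
    simp only [goB, contribB]
    ring
  | cons y rest ih =>
    intro stack res hp
    simp only [List.foldl_cons]
    have hpop := popAll_eq y stack
    set tw := stack.takeWhile (fun a => a > y) with htw
    set dw := stack.dropWhile (fun a => a > y) with hdw
    have hpd : dw.Pairwise (fun a b => b < a) := hp.sublist (List.dropWhile_sublist _)
    have hdwle : ∀ x ∈ dw, x ≤ y := by
      intro x hx
      cases hd : dw with
      | nil => rw [hd] at hx; simp at hx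
      | cons a t =>
        have ha : ¬ (a > y) := by
          have := List.head?_dropWhile_not (p := fun x => decide (x > y)) (l := stack)
          rw [← hdw, hd] at this; simpa using this
        have hpd' := hpd; rw [hd] at hpd'
        rw [hd] at hx
        rcases List.mem_cons.mp hx with rfl | hxt
        · omega
        · have := (List.pairwise_cons.mp hpd').1 x hxt; omega
    have htwmem : ∀ x ∈ tw, y < x := by
      intro x hx; have := List.mem_takeWhile_imp hx; simpa using this
    have hsplit : stack = tw ++ dw := (List.takeWhile_append_dropWhile).symm
    have hsum_tw : (tw.map (fun x => contribB x (y :: rest))).sum = (tw.length : Int) :=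
      sum_contrib_gt y rest tw htwmem
    simp only [stepA, hpop]
    by_cases hh : dw.head? = some y
    · -- skip case: y equals the new stack top
      rw [if_pos hh, ih dw (res + tw.length) hpd]
      obtain ⟨t, ht⟩ : ∃ t, dw = y :: t := by
        cases hd : dw with
        | nil => rw [hd] at hh; simp at hh
        | cons a t => rw [hd] at hh; simp at hh; exact ⟨t, by rw [hh]⟩
      have htlt : ∀ x ∈ t, x < y := by
        intro x hx
        have hpd' := hpd; rw [ht] at hpd'
        exact (List.pairwise_cons.mp hpd').1 x hx
      rw [hsplit, List.map_append, List.sum_append, hsum_tw, ht]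
      simp only [List.map, List.sum_cons, goB]
      rw [goB_acc rest (0 + contribB y rest)]
      have hcy : contribB y (y :: rest) = 0 := by simp [contribB]
      rw [hcy]
      have hmt : (t.map (fun x => contribB x (y :: rest))).sum
           = (t.map (fun x => contribB x rest)).sum := by
        apply congrArg; apply List.map_congr_left
        intro x hx; exact contrib_cons_of_lt y x rest (htlt x hx)
      rw [hmt]; ring
    · -- push case: y goes on top of the popped stack
      have hdlt : ∀ x ∈ dw, x < y := by
        intro x hx
        cases hd : dw with
        | nil => rw [hd] at hx; simp at hx
        | cons a t =>
          have hane : a ≠ y := by rw [hd] at hh; intro h; apply hh; simp [h]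
          have hale : a ≤ y := hdwle a (by rw [hd]; exact List.mem_cons_self)
          rw [hd] at hx
          rcases List.mem_cons.mp hx with rfl | hxt
          · omega
          · have hpd' := hpd; rw [hd] at hpd'
            have := (List.pairwise_cons.mp hpd').1 x hxt; omega
      have hpnew : (y :: dw).Pairwise (fun a b => b < a) :=
        List.pairwise_cons.mpr ⟨hdlt, hpd⟩
      rw [if_neg hh, ih (y :: dw) (res + tw.length) hpnew]
      rw [hsplit, List.map_append, List.sum_append, hsum_tw]
      simp only [List.map, List.sum_cons, goB]
      rw [goB_acc rest (0 + contribB y rest)]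
      have hmd : (dw.map (fun x => contribB x (y :: rest))).sum
           = (dw.map (fun x => contribB x rest)).sum := by
        apply congrArg; apply List.map_congr_left
        intro x hx; exact contrib_cons_of_lt y x rest (hdlt x hx)
      rw [hmd]; ring

-- ===== VERDICT (by name: the statement is the Claim_ definition above) =====
theorem solution_spec : Claim_equal_solution := by
  intro h _
  unfold Spec_solution solution solution_alt
  have := main_inv h [] 0 (by simp)
  simpa using this
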